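-- pv_equiv track=rewrite | github.com/ejyager00/adventOfCode2024 | day20/racecondition.py | get_track_positions
-- ===== SOURCE A (Python) =====
-- DIRECTIONS = ((0,-1),(-1,0),(0,1),(1,0))
--
-- def get_track_positions(racetrack: list[str], start: tuple[int, int], end: tuple[int, int]) -> dict[tuple[int, int],int]:
--     last_position = ()
--     position = start
--     track_positions = {}
--     while position!=end:
--         track_positions[position] = len(track_positions)
--         for y, x in DIRECTIONS:
--             if racetrack[position[0]+y][position[1]+x]=='.' and (position[0]+y,position[1]+x)!=last_position:
--                 last_position, position = position, (position[0]+y,position[1]+x)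
--                 break
--     else:
--         track_positions[position] = len(track_positions)
--     return track_positions
-- ===== SOURCE B (Python) =====
-- DIRECTIONS = ((0,-1),(-1,0),(0,1),(1,0))
--
-- def get_track_positions(racetrack: list[str], start: tuple[int, int], end: tuple[int, int]) -> dict[tuple[int, int],int]:
--     # BFS flood-fill from start over '.' cells (same unguarded grid indexing as the
--     # walk version: the racetrack is walled); on a single-corridor track the BFS
--     # label of each cell equals its step index along the walk.
--     distances = {start: 0}
--     queue = [start]
--     head = 0
--     while head < len(queue):
--         position = queue[head]
--         head += 1
--         if position == end:
--             continue
--         for y, x in DIRECTIONS: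
--             nr, nc = position[0] + y, position[1] + x
--             if racetrack[nr][nc] == '.' and (nr, nc) not in distances:
--                 distances[(nr, nc)] = len(distances)
--                 queue.append((nr, nc))
--     return distances
-- ===== Notes on version B (the rewrite author's own statement) =====
-- stated objective: alternative
-- what changed: Replaces A's scalar follow-the-corridor walk (current/last position, move to the first '.' neighbour that is not the previous cell, stop at end) by a queue-based BFS flood-fill from start that labels reachable '.' cells with increasing indices; on the single-corridor tracks admitted by Pre_ the BFS labels coincide with A's step indices.
import Mathlib
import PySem

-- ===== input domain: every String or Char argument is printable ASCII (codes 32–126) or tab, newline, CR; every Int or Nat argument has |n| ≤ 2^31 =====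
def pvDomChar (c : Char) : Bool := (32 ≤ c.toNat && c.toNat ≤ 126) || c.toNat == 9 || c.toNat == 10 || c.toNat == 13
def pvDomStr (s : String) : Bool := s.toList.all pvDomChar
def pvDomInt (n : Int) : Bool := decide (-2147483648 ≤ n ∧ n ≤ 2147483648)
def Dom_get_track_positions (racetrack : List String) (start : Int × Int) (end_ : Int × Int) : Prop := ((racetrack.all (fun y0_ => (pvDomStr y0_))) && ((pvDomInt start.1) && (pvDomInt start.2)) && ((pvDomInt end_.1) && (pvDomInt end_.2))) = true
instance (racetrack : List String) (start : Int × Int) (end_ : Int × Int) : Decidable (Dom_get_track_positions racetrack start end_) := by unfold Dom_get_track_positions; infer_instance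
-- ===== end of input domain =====

-- B replaces A's follow-the-corridor walk by a queue-based BFS flood-fill from start
-- (objective: alternative algorithm of the same cost); proved equal on single-corridor inputs (Pre_).

-- shared small definitions (used by both ports and by Pre_)
def pvDirs : List (Int × Int) := [(0,-1),(-1,0),(0,1),(1,0)]
def pvNbrs (p : Int × Int) : List (Int × Int) := pvDirs.map (fun d => (p.1 + d.1, p.2 + d.2))
-- fuel bound for the ports' loops: comfortably more than any terminating run needs
def pvFuel (racetrack : List String) : Nat :=
  20 * racetrack.foldl (fun a row => a + row.toList.length) 0 + 22

-- ===== PORT A =====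
-- racetrack[r][c] with Python index semantics (negative wraps, out of range = IndexError → none)
def pvCellA (racetrack : List String) (q : Int × Int) : Option Char :=
  (PySem.List.pyGet? racetrack q.1).bind (fun row => PySem.Str.pyGet? row q.2)

-- the for-loop over DIRECTIONS with break: first neighbour that is '.' and ≠ last_position
def pvFindA (racetrack : List String) (last : Option (Int × Int)) (pos : Int × Int) : Option (Int × Int) :=
  (pvNbrs pos).find? (fun q => (pvCellA racetrack q == some '.') && (some q != last))

-- the while-loop; fuel only makes the recursion total: when it runs out (or no direction
-- matches) the Python loops forever / raises — such inputs are outside Pre_.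
def pvWalkA (racetrack : List String) (end_ : Int × Int) :
    Nat → Option (Int × Int) → (Int × Int) → PySem.Dict (Int × Int) Int → PySem.Dict (Int × Int) Int
  | fuel, last, pos, d =>
    if pos = end_ then d.insert pos (d.size : Int)
    else
      let d' := d.insert pos (d.size : Int)
      match fuel with
      | 0 => d'
      | fuel' + 1 =>
        match pvFindA racetrack last pos with
        | none => d'
        | some m => pvWalkA racetrack end_ fuel' (some pos) m d'

def get_track_positions (racetrack : List String) (start : Int × Int) (end_ : Int × Int) : List (Int × Int × Int) :=
  (pvWalkA racetrack end_ (pvFuel racetrack) none start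
      (PySem.Dict.empty : PySem.Dict (Int × Int) Int)).items.map (fun e => (e.1.1, e.1.2, e.2))

-- ===== PORT B =====
-- Source B's '.' test: racetrack[nr][nc]=='.' with Python index semantics (same reads as A)
def pvCellB (racetrack : List String) (q : Int × Int) : Bool :=
  pvCellA racetrack q == some '.'

-- the inner for-loop of Source B over DIRECTIONS (state: distances dict, pending queue)
def pvScanB (racetrack : List String) (pos : Int × Int)
    (st : PySem.Dict (Int × Int) Int × List (Int × Int)) : PySem.Dict (Int × Int) Int × List (Int × Int) :=
  pvDirs.foldl (fun st dir =>
    let q := (pos.1 + dir.1, pos.2 + dir.2)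
    if pvCellB racetrack q && !(st.1.contains q) then (st.1.insert q (st.1.size : Int), st.2 ++ [q])
    else st) st

-- the while-loop of Source B; the list is queue[head:]; fuel only makes the recursion total
-- (Source B enqueues each key once, so the fuel bound is never reached by the Python).
def pvBFS (racetrack : List String) (end_ : Int × Int) :
    Nat → List (Int × Int) → PySem.Dict (Int × Int) Int → PySem.Dict (Int × Int) Int
  | _, [], d => d
  | 0, _ :: _, d => d
  | fuel + 1, p :: rest, d =>
    if p = end_ then pvBFS racetrack end_ fuel rest d
    else
      let st := pvScanB racetrack p (d, rest)
      pvBFS racetrack end_ fuel st.2 st.1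

def get_track_positions_alt (racetrack : List String) (start : Int × Int) (end_ : Int × Int) : List (Int × Int × Int) :=
  (pvBFS racetrack end_ (pvFuel racetrack) [start]
      ((PySem.Dict.empty : PySem.Dict (Int × Int) Int).insert start 0)).items.map (fun e => (e.1.1, e.1.2, e.2))

-- ===== PRECONDITION & SPEC =====
def pvDotB (racetrack : List String) (q : Int × Int) : Bool :=
  decide (0 ≤ q.1) && decide (0 ≤ q.2) && (pvCellA racetrack q == some '.')
def pvSpecB (racetrack : List String) (start : Int × Int) (q : Int × Int) : Bool :=
  pvDotB racetrack q || (q == start)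
def pvPosB (p : Int × Int) : Bool := decide (1 ≤ p.1) && decide (1 ≤ p.2)
-- all four neighbour reads racetrack[p0+y][p1+x] of a cell stay in range (no IndexError, no wrap)
def pvSafeB (racetrack : List String) (p : Int × Int) : Bool :=
  decide (p.1 + 1 < (racetrack.length : Int)) &&
  decide (p.2 + 1 < (((racetrack.getD p.1.toNat "").toList.length : Int))) &&
  decide (p.2 < (((racetrack.getD (p.1 - 1).toNat "").toList.length : Int))) &&
  decide (p.2 < (((racetrack.getD (p.1 + 1).toNat "").toList.length : Int)))
def pvAllCells (racetrack : List String) : List (Int × Int) :=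
  (List.range racetrack.length).flatMap (fun r =>
    (List.range ((racetrack.getD r "").toList.length)).map (fun c => ((r : Int), (c : Int))))

-- Pre_ admits start = end_ (A returns at once, touching nothing) and otherwise exactly the
-- single-corridor racetracks this function is for: start and every '.' cell off the wrapping
-- border (row/column ≥ 1), start not '.', end '.', start with exactly one '.' neighbour, and
-- every other '.' cell with exactly two neighbours that are '.' or start (one non-branching path).
-- On inputs outside Pre_ the Python A raises, loops forever, or (on a branching track) its
-- greedy walk returns an accidental subset of cells that no caller of this AoC helper feeds it.
def Pre_get_track_positions (racetrack : List String) (start : Int × Int) (end_ : Int × Int) : Prop :=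
  start = end_ ∨
  (pvPosB start = true ∧ pvSafeB racetrack start = true ∧
   pvDotB racetrack start = false ∧
   pvDotB racetrack end_ = true ∧
   (∀ p ∈ pvAllCells racetrack, pvDotB racetrack p = true → pvPosB p = true ∧ pvSafeB racetrack p = true) ∧
   (pvNbrs start).countP (pvDotB racetrack) = 1 ∧
   (∀ p ∈ pvAllCells racetrack, pvDotB racetrack p = true → p ≠ end_ →
      (pvNbrs p).countP (pvSpecB racetrack start) = 2))
instance (racetrack : List String) (start : Int × Int) (end_ : Int × Int) : Decidable (Pre_get_track_positions racetrack start end_) := by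
  unfold Pre_get_track_positions; infer_instance

def pvWitness_get_track_positions : List String × (Int × Int) × (Int × Int) :=
  (["#####", "#S..#", "#####"], (1, 1), (1, 3))

def Spec_get_track_positions (racetrack : List String) (start : Int × Int) (end_ : Int × Int) (out : List (Int × Int × Int)) : Prop := out = get_track_positions_alt racetrack start end_
instance (racetrack : List String) (start : Int × Int) (end_ : Int × Int) (out : List (Int × Int × Int)) : Decidable (Spec_get_track_positions racetrack start end_ out) := by unfold Spec_get_track_positions; infer_instance

-- ===== CLAIM (what is proved, stated in full; the proofs are below) =====
def Claim_equal_get_track_positions : Prop := ∀ (racetrack : List String) (start : Int × Int) (end_ : Int × Int), Dom_get_track_positions racetrack start end_ → Pre_get_track_positions racetrack start end_ → Spec_get_track_positions racetrack start end_ (get_track_positions racetrack start end_)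

-- ===== LEMMAS AND PROOFS =====

lemma pvFind?_eq_some_of_unique {α : Type} (p : α → Bool) :
    ∀ (l : List α) (a : α), a ∈ l → p a = true → (∀ x ∈ l, p x = true → x = a) →
      l.find? p = some a := by
  intro l a ha hpa hu
  induction l with
  | nil => cases ha
  | cons x t ih =>
    by_cases hx : p x = true
    · have : x = a := hu x (List.mem_cons_self ..) hx
      subst this
      simp [List.find?, hpa]
    · have hat : a ∈ t := by
        rcases List.mem_cons.1 ha with rfl | h
        · exact absurd hpa hx
        · exact h
      simp only [List.find?, hx]
      exact ih hat (fun y hy hpy => hu y (List.mem_cons_of_mem _ hy) hpy)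

lemma pvCountP_pos_exists {α : Type} (p : α → Bool) (l : List α) (h : 0 < l.countP p) :
    ∃ a ∈ l, p a = true := by
  simpa using List.countP_pos_iff.1 h

lemma pvCountP_one_unique {α : Type} [DecidableEq α] (p : α → Bool) (l : List α) (a : α)
    (ha : a ∈ l) (hpa : p a = true) (h : l.countP p = 1) :
    ∀ x ∈ l, p x = true → x = a := by
  intro x hx hpx
  by_contra hne
  have haf : a ∈ l.filter p := List.mem_filter.2 ⟨ha, hpa⟩
  have hxf : x ∈ l.filter p := List.mem_filter.2 ⟨hx, hpx⟩
  have hlen : (l.filter p).length = 1 := by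
    simpa [List.countP_eq_length_filter] using h
  obtain ⟨b, hb⟩ := List.length_eq_one_iff.1 hlen
  rw [hb] at haf hxf
  simp at haf hxf
  exact hne (hxf.trans haf.symm)

lemma pvCountP_two_pair {α : Type} [DecidableEq α] (p : α → Bool) (l : List α) (a : α)
    (hnd : l.Nodup) (ha : a ∈ l) (hpa : p a = true) (h : l.countP p = 2) :
    ∃ b, b ∈ l ∧ p b = true ∧ b ≠ a ∧ ∀ x ∈ l, p x = true → x = a ∨ x = b := by
  have hlen : (l.filter p).length = 2 := by
    simpa [List.countP_eq_length_filter] using h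
  have hndf : (l.filter p).Nodup := hnd.filter p
  obtain ⟨u, v, huv⟩ := List.length_eq_two.1 hlen
  have haf : a ∈ l.filter p := List.mem_filter.2 ⟨ha, hpa⟩
  have huvne : u ≠ v := by
    rw [huv] at hndf; simpa using hndf
  have hmemf : ∀ x ∈ l, p x = true → x = u ∨ x = v := by
    intro x hx hpx
    have : x ∈ l.filter p := List.mem_filter.2 ⟨hx, hpx⟩
    rw [huv] at this; simpa using this
  have humem : u ∈ l ∧ p u = true := by
    have : u ∈ l.filter p := by rw [huv]; simp
    exact ⟨(List.mem_filter.1 this).1, (List.mem_filter.1 this).2⟩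
  have hvmem : v ∈ l ∧ p v = true := by
    have : v ∈ l.filter p := by rw [huv]; simp
    exact ⟨(List.mem_filter.1 this).1, (List.mem_filter.1 this).2⟩
  rcases hmemf a ha hpa with rfl | rfl
  · exact ⟨v, hvmem.1, hvmem.2, fun hv => huvne hv.symm, fun x hx hpx => hmemf x hx hpx⟩
  · exact ⟨u, humem.1, humem.2, fun hv => huvne hv, fun x hx hpx => (hmemf x hx hpx).symm⟩

lemma pvMem_nbrs (p q : Int × Int) :
    q ∈ pvNbrs p ↔ q = (p.1, p.2 + -1) ∨ q = (p.1 + -1, p.2) ∨ q = (p.1, p.2 + 1) ∨ q = (p.1 + 1, p.2) := by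
  simp [pvNbrs, pvDirs]

lemma pvNbrs_ne {p q : Int × Int} (h : q ∈ pvNbrs p) : q ≠ p := by
  rcases (pvMem_nbrs p q).1 h with h | h | h | h <;> subst h <;>
    simp [Prod.ext_iff]

lemma pvNbrs_symm {p q : Int × Int} (h : q ∈ pvNbrs p) : p ∈ pvNbrs q := by
  rcases (pvMem_nbrs p q).1 h with h | h | h | h <;> subst h <;>
    simp [pvMem_nbrs, Prod.ext_iff]

lemma pvNbrs_nodup (p : Int × Int) : (pvNbrs p).Nodup := by
  simp [pvNbrs, pvDirs, Prod.ext_iff]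

lemma pvNbrs_nonneg {p q : Int × Int}
    (hint : pvPosB p = true) (h : q ∈ pvNbrs p) : 0 ≤ q.1 ∧ 0 ≤ q.2 := by
  simp [pvPosB] at hint
  rcases (pvMem_nbrs p q).1 h with h | h | h | h <;> subst h <;> simp <;> omega

lemma pvDotB_of_nonneg {racetrack : List String} {q : Int × Int} (h1 : 0 ≤ q.1) (h2 : 0 ≤ q.2) :
    pvDotB racetrack q = (pvCellA racetrack q == some '.') := by
  simp [pvDotB, h1, h2]

lemma pvCellB_eq_dotB (racetrack : List String) (q : Int × Int) (h1 : 0 ≤ q.1) (h2 : 0 ≤ q.2) :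
    pvCellB racetrack q = pvDotB racetrack q := by
  rw [pvDotB_of_nonneg h1 h2, pvCellB]

lemma pvDotB_mem_allCells {racetrack : List String} {q : Int × Int}
    (h : pvDotB racetrack q = true) : q ∈ pvAllCells racetrack := by
  rcases q with ⟨i, j⟩
  simp only [pvDotB, Bool.and_eq_true, decide_eq_true_eq, beq_iff_eq] at h
  obtain ⟨⟨h1, h2⟩, hch⟩ := h
  obtain ⟨n1, rfl⟩ : ∃ n : Nat, i = (n : Int) := ⟨i.toNat, (Int.toNat_of_nonneg h1).symm⟩
  obtain ⟨n2, rfl⟩ : ∃ n : Nat, j = (n : Int) := ⟨j.toNat, (Int.toNat_of_nonneg h2).symm⟩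
  simp only [pvCellA, PySem.List.pyGet?_natCast, PySem.Str.pyGet?_natCast] at hch
  rcases hb : racetrack[n1]? with _ | row
  · rw [hb] at hch; simp [Option.bind] at hch
  · have hlt' : n1 < racetrack.length := by
      rcases List.getElem?_eq_some_iff.1 hb with ⟨hh, -⟩; exact hh
    rw [hb] at hch
    simp only [Option.bind_some] at hch
    have hlt2' : n2 < row.toList.length := by
      by_contra hge
      rw [List.getElem?_eq_none (by omega)] at hch; cases hch
    simp [pvAllCells, List.mem_flatMap, List.mem_map, List.mem_range]
    refine ⟨hlt', ?_⟩
    rw [hb]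
    simpa using hlt2'

def pvEnum (xs : List (Int × Int)) : PySem.Dict (Int × Int) Int :=
  xs.foldl (fun d x => d.insert x (d.size : Int)) PySem.Dict.empty

lemma pvEnum_snoc (xs : List (Int × Int)) (m : Int × Int) :
    pvEnum (xs ++ [m]) = (pvEnum xs).insert m ((pvEnum xs).size : Int) := by
  simp [pvEnum]

lemma pvEnum_keys (xs : List (Int × Int)) (h : xs.Nodup) : (pvEnum xs).keys = xs := by
  induction xs using List.reverseRecOn with
  | nil => simp [pvEnum]
  | append_singleton xs m ih =>
    have hnd : xs.Nodup := (List.nodup_append.1 h).1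
    have hm : m ∉ xs := by
      intro hmem
      exact (List.nodup_append.1 h).2.2 m hmem m (by simp) rfl
    rw [pvEnum_snoc]
    have hc : (pvEnum xs).contains m = false := by
      rw [PySem.Dict.contains_eq_decide_mem_keys, ih hnd]
      simp [hm]
    rw [PySem.Dict.keys_insert_of_not_contains _ _ hc, ih hnd]

lemma pvEnum_contains (xs : List (Int × Int)) (q : Int × Int) (h : xs.Nodup) :
    (pvEnum xs).contains q = decide (q ∈ xs) := by
  rw [PySem.Dict.contains_eq_decide_mem_keys, pvEnum_keys xs h]

-- the walk invariant: pvW l p ds = A's walk reached p with previous cell l and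
-- earlier cells ds (most recent first); each step recorded the local corridor facts.
inductive pvW (racetrack : List String) (start : Int × Int) : (Int × Int) → (Int × Int) → List (Int × Int) → Prop
  | first (m : Int × Int) (hd : pvDotB racetrack m = true) (ha : m ∈ pvNbrs start)
      (hu : ∀ n, pvDotB racetrack n = true → n ∈ pvNbrs start → n = m) :
      pvW racetrack start start m []
  | step {l p : Int × Int} {ds : List (Int × Int)} (m : Int × Int)
      (hw : pvW racetrack start l p ds) (hd : pvDotB racetrack m = true) (ha : m ∈ pvNbrs p)
      (hne : m ≠ l)
      (hu : ∀ n, pvSpecB racetrack start n = true → n ∈ pvNbrs p → n = l ∨ n = m) :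
      pvW racetrack start p m (l :: ds)

lemma pvW_dotp {racetrack : List String} {start l p : Int × Int} {ds : List (Int × Int)}
    (hw : pvW racetrack start l p ds) : pvDotB racetrack p = true := by
  cases hw <;> assumption

lemma pvW_lspec {racetrack : List String} {start l p : Int × Int} {ds : List (Int × Int)}
    (hw : pvW racetrack start l p ds) : pvSpecB racetrack start l = true := by
  cases hw with
  | first m hd ha hu => simp [pvSpecB]
  | step m hw' hd ha hne hu => simp [pvSpecB, pvW_dotp hw']

lemma pvW_adj {racetrack : List String} {start l p : Int × Int} {ds : List (Int × Int)}
    (hw : pvW racetrack start l p ds) : p ∈ pvNbrs l := by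
  cases hw <;> assumption

lemma pvW_closed {racetrack : List String} {start l p : Int × Int} {ds : List (Int × Int)}
    (hw : pvW racetrack start l p ds) :
    ∀ q ∈ l :: ds, ∀ n, pvSpecB racetrack start n = true → n ∈ pvNbrs q → n ∈ p :: l :: ds := by
  induction hw with
  | first m hd ha hu =>
    intro q hq n hn hadj
    simp only [List.mem_cons, List.not_mem_nil, or_false] at hq
    subst hq
    have hne := pvNbrs_ne hadj
    have hdn : pvDotB racetrack n = true := by
      simp only [pvSpecB, Bool.or_eq_true, beq_iff_eq] at hn
      rcases hn with hn | hn
      · exact hn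
      · exact absurd hn hne
    have := hu n hdn hadj
    simp [this]
  | @step l p ds m hw hd ha hne hu ih =>
    intro q hq n hn hadj
    rcases List.mem_cons.1 hq with rfl | hq'
    · rcases hu n hn hadj with rfl | rfl <;> simp
    · have := ih q hq' n hn hadj
      simp only [List.mem_cons] at this ⊢
      tauto

lemma pvW_freshnbr {racetrack : List String} {start l p : Int × Int} {ds : List (Int × Int)}
    (hw : pvW racetrack start l p ds) :
    ∀ n, pvSpecB racetrack start n = true → n ∈ pvNbrs p → n ≠ l → n ∉ p :: l :: ds := by
  induction hw with
  | first m hd ha hu =>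
    intro n hn hadj hnl
    have hnm := pvNbrs_ne hadj
    simp [hnm, hnl]
  | @step l p ds m hw hd ha hne hu ih =>
    intro n hn hadj hnp
    have h1 : n ≠ m := pvNbrs_ne hadj
    have h2 : n ∉ l :: ds := by
      intro hmem
      have hmfresh : m ∉ p :: l :: ds := ih m (by simp [pvSpecB, hd]) ha hne
      have hmold : m ∈ p :: l :: ds :=
        pvW_closed hw n hmem m (by simp [pvSpecB, hd]) (pvNbrs_symm hadj)
      exact hmfresh hmold
    simp only [List.mem_cons] at h2 ⊢
    tauto

lemma pvW_nodup {racetrack : List String} {start l p : Int × Int} {ds : List (Int × Int)}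
    (hs : pvDotB racetrack start = false) (hw : pvW racetrack start l p ds) :
    (p :: l :: ds).Nodup := by
  induction hw with
  | first m hd ha hu =>
    have hms : ∀ x, pvDotB racetrack x = false → m ≠ x := by
      intro x hx e; rw [e, hx] at hd; cases hd
    simp [hms _ hs]
  | @step l p ds m hw hd ha hne hu ih =>
    have hm : m ∉ p :: l :: ds := pvW_freshnbr hw m (by simp [pvSpecB, hd]) ha hne
    exact List.nodup_cons.2 ⟨hm, ih⟩

lemma pvW_start_unique {racetrack : List String} {start l p : Int × Int} {ds : List (Int × Int)}
    (hw : pvW racetrack start l p ds) :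
    ∃ u, (∀ n, pvDotB racetrack n = true → n ∈ pvNbrs start → n = u) ∧
      (u = p → ds = [] ∧ l = start) ∧ u ∈ p :: l :: ds := by
  induction hw with
  | first m hd ha hu => exact ⟨m, hu, fun _ => ⟨rfl, rfl⟩, by simp⟩
  | @step l p ds m hw hd ha hne hu ih =>
    obtain ⟨u, hu', himp, hmem⟩ := ih
    refine ⟨u, hu', ?_, ?_⟩
    · intro he
      exfalso
      have hm : m ∉ p :: l :: ds := pvW_freshnbr hw m (by simp [pvSpecB, hd]) ha hne
      rw [he] at hmem
      exact hm hmem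
    · simp only [List.mem_cons] at hmem ⊢
      tauto

-- one corridor step: the unique fresh continuation m
lemma pvStep {racetrack : List String} {start end_ : Int × Int}
    (hs : pvDotB racetrack start = false)
    (hdeg : ∀ p ∈ pvAllCells racetrack, pvDotB racetrack p = true → p ≠ end_ →
      (pvNbrs p).countP (pvSpecB racetrack start) = 2)
    {l p : Int × Int} {ds : List (Int × Int)}
    (hw : pvW racetrack start l p ds) (hpe : p ≠ end_) :
    ∃ m, pvDotB racetrack m = true ∧ m ∈ pvNbrs p ∧ m ≠ l ∧ m ∉ p :: l :: ds ∧
      (∀ n, pvSpecB racetrack start n = true → n ∈ pvNbrs p → n = l ∨ n = m) ∧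
      pvW racetrack start p m (l :: ds) := by
  have hdp : pvDotB racetrack p = true := pvW_dotp hw
  have hmem : p ∈ pvAllCells racetrack := pvDotB_mem_allCells hdp
  have hcount := hdeg p hmem hdp hpe
  have hlnb : l ∈ pvNbrs p := pvNbrs_symm (pvW_adj hw)
  have hlspec : pvSpecB racetrack start l = true := pvW_lspec hw
  obtain ⟨m, hmnb, hmspec, hmne, huniv⟩ :=
    pvCountP_two_pair (pvSpecB racetrack start) (pvNbrs p) l (pvNbrs_nodup p) hlnb hlspec hcount
  have hdm : pvDotB racetrack m = true := by
    simp only [pvSpecB, Bool.or_eq_true, beq_iff_eq] at hmspec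
    rcases hmspec with hdm | hms
    · exact hdm
    · exfalso
      subst hms
      have hps : p ∈ pvNbrs m := pvNbrs_symm hmnb
      obtain ⟨u, hu', himp, humem⟩ := pvW_start_unique hw
      have hpu : p = u := hu' p hdp hps
      obtain ⟨hds, hl⟩ := himp hpu.symm
      exact hmne hl.symm
  have huniv' : ∀ n, pvSpecB racetrack start n = true → n ∈ pvNbrs p → n = l ∨ n = m :=
    fun n hn hadj => huniv n hadj hn
  have hfresh : m ∉ p :: l :: ds := pvW_freshnbr hw m (by simp [pvSpecB, hdm]) hmnb hmne
  exact ⟨m, hdm, hmnb, hmne, hfresh, huniv',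
    pvW.step m hw hdm hmnb hmne huniv'⟩

lemma pvFindA_eq_some (racetrack : List String) (last : Option (Int × Int)) (pos m : Int × Int)
    (hm : m ∈ pvNbrs pos)
    (hq : ((pvCellA racetrack m == some '.') && (some m != last)) = true)
    (hu : ∀ x ∈ pvNbrs pos, ((pvCellA racetrack x == some '.') && (some x != last)) = true → x = m) :
    pvFindA racetrack last pos = some m :=
  pvFind?_eq_some_of_unique _ _ _ hm hq hu

lemma pvScanB_skip (racetrack : List String) (pos : Int × Int)
    (st : PySem.Dict (Int × Int) Int × List (Int × Int)) (L : List (Int × Int))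
    (h : ∀ dir ∈ L, (pvCellB racetrack (pos.1 + dir.1, pos.2 + dir.2) &&
          !(st.1.contains (pos.1 + dir.1, pos.2 + dir.2))) = false) :
    L.foldl (fun st dir =>
      let q := (pos.1 + dir.1, pos.2 + dir.2)
      if pvCellB racetrack q && !(st.1.contains q) then (st.1.insert q (st.1.size : Int), st.2 ++ [q])
      else st) st = st := by
  induction L with
  | nil => rfl
  | cons dir L ih =>
    have h0 := h dir (List.mem_cons_self ..)
    simp only [List.foldl_cons, h0, Bool.false_eq_true, if_false]
    exact ih (fun d hd => h d (List.mem_cons_of_mem _ hd))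

-- the BFS inner loop on a corridor cell: exactly the fresh continuation m is enqueued
lemma pvScanB_corridor {racetrack : List String} {pos m : Int × Int} {V : List (Int × Int)}
    (hint : pvPosB pos = true)
    (hnd : (V ++ [m]).Nodup)
    (hm : m ∈ pvNbrs pos) (hdm : pvDotB racetrack m = true) (hmV : m ∉ V)
    (hdot : ∀ q ∈ pvNbrs pos, pvDotB racetrack q = true → q ≠ m → q ∈ V) :
    pvScanB racetrack pos (pvEnum V, []) = (pvEnum (V ++ [m]), [m]) := by
  obtain ⟨dir0, hdir0, hf⟩ := List.mem_map.1 hm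
  obtain ⟨L1, L2, hsplit⟩ := List.append_of_mem hdir0
  have hVnd : V.Nodup := (List.nodup_append.1 hnd).1
  have hnomatch : ∀ d, d ∈ L1 ∨ d ∈ L2 → (pos.1 + d.1, pos.2 + d.2) ≠ m := by
    intro d hd he
    have hnodup : (pvNbrs pos).Nodup := pvNbrs_nodup pos
    rw [show pvNbrs pos = (L1 ++ dir0 :: L2).map (fun d => (pos.1 + d.1, pos.2 + d.2)) from by
      rw [pvNbrs, hsplit]] at hnodup
    rw [List.map_append, List.map_cons, hf] at hnodup
    have hpair := List.nodup_append.1 hnodup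
    rcases hd with hd | hd
    · exact hpair.2.2 m (by exact List.mem_map.2 ⟨d, hd, he⟩) m (by simp) rfl
    · have hmcons := hpair.2.1
      rw [List.nodup_cons] at hmcons
      exact hmcons.1 (List.mem_map.2 ⟨d, hd, he⟩)
  have key : ∀ (e : PySem.Dict (Int × Int) Int) (dir : Int × Int), dir ∈ pvDirs →
      (pos.1 + dir.1, pos.2 + dir.2) ≠ m → (∀ x ∈ V, e.contains x = true) →
      (pvCellB racetrack (pos.1 + dir.1, pos.2 + dir.2) &&
        !(e.contains (pos.1 + dir.1, pos.2 + dir.2))) = false := by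
    intro e dir hdir hne hcont
    have hq : (pos.1 + dir.1, pos.2 + dir.2) ∈ pvNbrs pos := List.mem_map.2 ⟨dir, hdir, rfl⟩
    obtain ⟨hq1, hq2⟩ := pvNbrs_nonneg hint hq
    rw [pvCellB_eq_dotB _ _ hq1 hq2]
    cases hdq : pvDotB racetrack (pos.1 + dir.1, pos.2 + dir.2) with
    | false => simp
    | true =>
      have hqV : (pos.1 + dir.1, pos.2 + dir.2) ∈ V := hdot _ hq hdq hne
      rw [hcont _ hqV]
      simp
  have hcV : ∀ x ∈ V, (pvEnum V).contains x = true := by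
    intro x hx
    rw [pvEnum_contains _ _ hVnd]
    simp [hx]
  have hcV' : ∀ x ∈ V, (pvEnum (V ++ [m])).contains x = true := by
    intro x hx
    rw [pvEnum_contains _ _ hnd]
    simp [hx]
  obtain ⟨hm1, hm2⟩ := pvNbrs_nonneg hint hm
  have hcondm : (pvCellB racetrack (pos.1 + dir0.1, pos.2 + dir0.2) &&
      !((pvEnum V).contains (pos.1 + dir0.1, pos.2 + dir0.2))) = true := by
    rw [hf, pvCellB_eq_dotB _ _ hm1 hm2, hdm, pvEnum_contains _ _ hVnd]
    simp [hmV]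
  unfold pvScanB
  rw [hsplit, List.foldl_append,
    pvScanB_skip racetrack pos (pvEnum V, []) L1
      (fun d hd => key _ d (by rw [hsplit]; exact List.mem_append_left _ hd) (hnomatch d (Or.inl hd)) hcV),
    List.foldl_cons]
  simp only [hcondm, if_true]
  rw [show ((pvEnum V).insert (pos.1 + dir0.1, pos.2 + dir0.2) ((pvEnum V).size : Int),
        ([] : List (Int × Int)) ++ [(pos.1 + dir0.1, pos.2 + dir0.2)]) =
      (pvEnum (V ++ [m]), [m]) from by rw [hf, ← pvEnum_snoc]; simp]
  exact pvScanB_skip racetrack pos (pvEnum (V ++ [m]), [m]) L2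
    (fun d hd => key _ d (by rw [hsplit]; simp [hd]) (hnomatch d (Or.inr hd)) hcV')

lemma pvWalkA_zero (racetrack : List String) (end_ : Int × Int) (last : Option (Int × Int))
    (pos : Int × Int) (d : PySem.Dict (Int × Int) Int) :
    pvWalkA racetrack end_ 0 last pos d = d.insert pos (d.size : Int) := by
  rw [pvWalkA]
  split <;> rfl

lemma pvWalkA_succ (racetrack : List String) (end_ : Int × Int) (fuel : Nat)
    (last : Option (Int × Int)) (pos : Int × Int) (d : PySem.Dict (Int × Int) Int) :
    pvWalkA racetrack end_ (fuel + 1) last pos d =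
      if pos = end_ then d.insert pos (d.size : Int)
      else
        match pvFindA racetrack last pos with
        | none => d.insert pos (d.size : Int)
        | some m => pvWalkA racetrack end_ fuel (some pos) m (d.insert pos (d.size : Int)) := by
  rw [pvWalkA]

lemma pvBFS_nil (racetrack : List String) (end_ : Int × Int) (fuel : Nat)
    (d : PySem.Dict (Int × Int) Int) : pvBFS racetrack end_ fuel [] d = d := by
  cases fuel <;> rfl

lemma pvBFS_zero (racetrack : List String) (end_ : Int × Int) (q : List (Int × Int))
    (d : PySem.Dict (Int × Int) Int) : pvBFS racetrack end_ 0 q d = d := by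
  cases q <;> rfl

lemma pvBFS_succ (racetrack : List String) (end_ : Int × Int) (fuel : Nat) (p : Int × Int)
    (rest : List (Int × Int)) (d : PySem.Dict (Int × Int) Int) :
    pvBFS racetrack end_ (fuel + 1) (p :: rest) d =
      if p = end_ then pvBFS racetrack end_ fuel rest d
      else
        let st := pvScanB racetrack p (d, rest)
        pvBFS racetrack end_ fuel st.2 st.1 := rfl

-- the two state machines stay synchronized along the corridor (any fuel)
lemma pvSIM {racetrack : List String} {start end_ : Int × Int}
    (hs : pvDotB racetrack start = false)
    (hall : ∀ p ∈ pvAllCells racetrack, pvDotB racetrack p = true →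
      pvPosB p = true ∧ pvSafeB racetrack p = true)
    (hdeg : ∀ p ∈ pvAllCells racetrack, pvDotB racetrack p = true → p ≠ end_ →
      (pvNbrs p).countP (pvSpecB racetrack start) = 2) :
    ∀ (fuel : Nat) (l p : Int × Int) (ds : List (Int × Int)), pvW racetrack start l p ds →
      pvWalkA racetrack end_ fuel (some l) p (pvEnum ((l :: ds).reverse)) =
      pvBFS racetrack end_ fuel [p] (pvEnum ((l :: ds).reverse ++ [p])) := by
  intro fuel
  induction fuel with
  | zero =>
    intro l p ds hw
    rw [pvWalkA_zero, pvBFS_zero, pvEnum_snoc]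
  | succ f ih =>
    intro l p ds hw
    by_cases hpe : p = end_
    · rw [pvWalkA_succ, if_pos hpe, pvBFS_succ, if_pos hpe, pvBFS_nil, pvEnum_snoc]
    · obtain ⟨m, hdm, hmnb, hmne, hfresh, huniq, hW'⟩ := pvStep hs hdeg hw hpe
      have hdp := pvW_dotp hw
      have hint : pvPosB p = true := (hall p (pvDotB_mem_allCells hdp) hdp).1
      have hfind : pvFindA racetrack (some l) p = some m := by
        apply pvFindA_eq_some _ _ _ _ hmnb
        · obtain ⟨h1, h2⟩ := pvNbrs_nonneg hint hmnb
          have hch : (pvCellA racetrack m == some '.') = true := by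
            rw [← pvDotB_of_nonneg h1 h2]; exact hdm
          simp [hch, hmne]
        · intro x hx hpx
          obtain ⟨h1, h2⟩ := pvNbrs_nonneg hint hx
          simp only [Bool.and_eq_true] at hpx
          have hdx : pvDotB racetrack x = true := by
            rw [pvDotB_of_nonneg h1 h2]; exact hpx.1
          have hxl : x ≠ l := by
            intro e
            subst e
            simp at hpx
          rcases huniq x (by simp [pvSpecB, hdx]) hx with e | e
          · exact absurd e hxl
          · exact e
      rw [pvWalkA_succ, if_neg hpe, hfind, pvEnum_snoc ((l :: ds).reverse) p |>.symm]
      rw [pvBFS_succ, if_neg hpe]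
      have hscan : pvScanB racetrack p (pvEnum ((l :: ds).reverse ++ [p]), []) =
          (pvEnum (((l :: ds).reverse ++ [p]) ++ [m]), [m]) := by
        apply pvScanB_corridor hint ?_ hmnb hdm ?_ ?_
        · rw [show (((l :: ds).reverse ++ [p]) ++ [m]) = (m :: p :: l :: ds).reverse from by simp]
          exact List.nodup_reverse.2 (pvW_nodup hs hW')
        · simp only [List.mem_append, List.mem_reverse, List.mem_cons,
            List.not_mem_nil, or_false] at hfresh ⊢
          tauto
        · intro q hqnb hdq hqm
          rcases huniq q (by simp [pvSpecB, hdq]) hqnb with rfl | rfl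
          · simp
          · exact absurd rfl hqm
      simp only [hscan]
      have := ih p m (l :: ds) hW'
      simpa [List.reverse_cons] using this

-- ===== VERDICT (by name: the statement is the Claim_ definition above) =====
theorem get_track_positions_spec : Claim_equal_get_track_positions := by
  intro racetrack start end_ hdom hpre
  unfold Spec_get_track_positions get_track_positions get_track_positions_alt
  rcases hpre with heq | ⟨hintS, hsafeS, hs, hde, hall, hcount1, hdeg⟩
  · subst heq
    have h1 : ∀ fuel, pvWalkA racetrack start fuel none start PySem.Dict.empty =
        PySem.Dict.empty.insert start 0 := by
      intro fuel
      cases fuel with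
      | zero => rw [pvWalkA_zero]; rfl
      | succ f => rw [pvWalkA_succ, if_pos rfl]; rfl
    have h2 : ∀ f, pvBFS racetrack start (f + 1) [start] (PySem.Dict.empty.insert start 0) =
        PySem.Dict.empty.insert start 0 := by
      intro f
      rw [pvBFS_succ, if_pos rfl, pvBFS_nil]
    exact congrArg (fun d => d.items.map (fun e => (e.1.1, e.1.2, e.2)))
      ((h1 _).trans (h2 (pvFuel racetrack - 1)).symm)
  · have hse : start ≠ end_ := by
      intro e
      rw [e, hde] at hs
      cases hs
    have hpos : 0 < (pvNbrs start).countP (pvDotB racetrack) := by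
      rw [hcount1]
      norm_num
    obtain ⟨m, hmnb, hdm⟩ := pvCountP_pos_exists _ _ hpos
    have huniq1 := pvCountP_one_unique _ _ m hmnb hdm hcount1
    have hW : pvW racetrack start start m [] :=
      pvW.first m hdm hmnb (fun n hn hmemn => huniq1 n hmemn hn)
    have hfind : pvFindA racetrack none start = some m := by
      apply pvFindA_eq_some _ _ _ _ hmnb
      · obtain ⟨h1, h2⟩ := pvNbrs_nonneg hintS hmnb
        have hch : (pvCellA racetrack m == some '.') = true := by
          rw [← pvDotB_of_nonneg h1 h2]
          exact hdm
        simp [hch]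
      · intro x hx hpx
        obtain ⟨h1, h2⟩ := pvNbrs_nonneg hintS hx
        simp only [Bool.and_eq_true] at hpx
        exact huniq1 x hx (by rw [pvDotB_of_nonneg h1 h2]; exact hpx.1)
    have hdicts : pvWalkA racetrack end_ ((20 * racetrack.foldl (fun a row => a + row.toList.length) 0 + 21) + 1) none start PySem.Dict.empty =
        pvBFS racetrack end_ ((20 * racetrack.foldl (fun a row => a + row.toList.length) 0 + 21) + 1) [start] (PySem.Dict.empty.insert start 0) := by
      rw [pvWalkA_succ, if_neg hse, hfind]
      rw [pvBFS_succ, if_neg hse]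
      have hscan : pvScanB racetrack start (PySem.Dict.empty.insert start 0, []) =
          (pvEnum ([start] ++ [m]), [m]) := by
        have hrw : (PySem.Dict.empty.insert start (0 : Int)) = pvEnum [start] := rfl
        rw [hrw]
        apply pvScanB_corridor hintS ?_ hmnb hdm ?_ ?_
        · simp [Ne.symm (pvNbrs_ne hmnb)]
        · simp [pvNbrs_ne hmnb]
        · intro q hq hdq hqm
          exact absurd (huniq1 q hq hdq) hqm
      simp only [hscan]
      have hsim := pvSIM hs hall hdeg (20 * racetrack.foldl (fun a row => a + row.toList.length) 0 + 21) start m [] hW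
      simpa [pvEnum] using hsim
    exact congrArg (fun d => d.items.map (fun e => (e.1.1, e.1.2, e.2))) hdicts
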